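-- pv_equiv track=rewrite | github.com/whopriyam/NER-System-NTU | NERSystem/InverseTextNormalization/scripts/parser.py | tag_items
-- ===== SOURCE A (Python) =====
-- def tag_items(tag, phrase):
--     HEADER = 'B-{}'.format(tag)
--     TRAILER = 'L-{}'.format(tag)
--     MIDDLE = 'I-{}'.format(tag)
--     SINGLE = 'U-{}'.format(tag)
--
--     words = [x.lower() for x in phrase.split()]
--
--     if tag == 'O':
--         return [[x, 'O'] for x in words]
--
--     if len(words) == 0:
--         return [[x, 'O'] for x in words]
--
--     if len(words) == 1:
--         return [[words[0], SINGLE], ]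
--
--     if len(words) == 2:
--         return [[words[0], HEADER], [words[1], TRAILER]]
--
--     intermediaries = [[x, MIDDLE] for x in words[1:-1]]
--
--     result = []
--     result.extend([[words[0], HEADER], ])
--     result.extend(intermediaries)
--     result.extend([[words[-1], TRAILER], ])
--
--     return result
-- ===== SOURCE B (Python) =====
-- def tag_items(tag, phrase):
--     words = [x.lower() for x in phrase.split()]
--     n = len(words)
--     out = []
--     for i, w in enumerate(words):
--         if tag == 'O':
--             t = 'O'
--         elif n == 1:
--             t = 'U-' + tag
--         elif i == 0:
--             t = 'B-' + tag
--         elif i == n - 1: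
--             t = 'L-' + tag
--         else:
--             t = 'I-' + tag
--         out.append([w, t])
--     return out
-- ===== Notes on version B (the rewrite author's own statement) =====
-- stated objective: simpler
-- what changed: Replaces A's four length-dispatch special cases (0/1/2/>=3) and three-part list concatenation with one uniform positional pass over enumerate(words) that picks each word's BILOU tag from its index.
import Mathlib
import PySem

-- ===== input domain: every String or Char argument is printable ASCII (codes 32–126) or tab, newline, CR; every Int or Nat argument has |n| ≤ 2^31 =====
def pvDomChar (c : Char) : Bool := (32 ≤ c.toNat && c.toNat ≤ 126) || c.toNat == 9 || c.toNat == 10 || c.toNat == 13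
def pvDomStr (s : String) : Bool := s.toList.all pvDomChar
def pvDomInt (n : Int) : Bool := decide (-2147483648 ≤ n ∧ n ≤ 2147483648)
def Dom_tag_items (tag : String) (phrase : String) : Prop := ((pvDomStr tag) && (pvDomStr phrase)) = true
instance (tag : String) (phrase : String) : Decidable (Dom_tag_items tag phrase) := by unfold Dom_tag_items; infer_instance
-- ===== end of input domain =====

-- B replaces A's four length-based special cases with one positional pass over enumerate(words); simpler, same O(n) cost.

-- ===== PORT A =====
def tag_items (tag : String) (phrase : String) : List (List String) :=
  let HEADER := "B-" ++ tag
  let TRAILER := "L-" ++ tag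
  let MIDDLE := "I-" ++ tag
  let SINGLE := "U-" ++ tag
  let words := (PySem.Str.split₀ phrase).map PySem.Str.lower
  if tag = "O" then words.map (fun x => [x, "O"])
  else if words.length = 0 then words.map (fun x => [x, "O"])
  else if words.length = 1 then [[PySem.List.pyGetD words 0 "", SINGLE]]
  else if words.length = 2 then
    [[PySem.List.pyGetD words 0 "", HEADER], [PySem.List.pyGetD words 1 "", TRAILER]]
  else
    let intermediaries := (PySem.List.slice words (some 1) (some (-1))).map (fun x => [x, MIDDLE])
    let result : List (List String) := []
    let result := result ++ [[PySem.List.pyGetD words 0 "", HEADER]]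
    let result := result ++ intermediaries
    let result := result ++ [[PySem.List.pyGetD words (-1) "", TRAILER]]
    result

-- ===== PORT B =====
def tag_items_alt (tag : String) (phrase : String) : List (List String) :=
  let words := (PySem.Str.split₀ phrase).map PySem.Str.lower
  let n : Int := words.length
  (PySem.List.enumerate words 0).foldl (fun out p =>
    out ++ [[p.2,
      if tag = "O" then "O"
      else if n = 1 then "U-" ++ tag
      else if p.1 = 0 then "B-" ++ tag
      else if p.1 = n - 1 then "L-" ++ tag
      else "I-" ++ tag]]) []

-- ===== PRECONDITION & SPEC =====
def Spec_tag_items (tag : String) (phrase : String) (out : List (List String)) : Prop := out = tag_items_alt tag phrase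
instance (tag : String) (phrase : String) (out : List (List String)) : Decidable (Spec_tag_items tag phrase out) := by unfold Spec_tag_items; infer_instance

-- ===== CLAIM (what is proved, stated in full; the proofs are below) =====
def Claim_equal_tag_items : Prop := ∀ (tag : String) (phrase : String), Dom_tag_items tag phrase → Spec_tag_items tag phrase (tag_items tag phrase)

-- ===== LEMMAS AND PROOFS =====
theorem map_enum_snd {α β : Type} (g : α → β) (xs : List α) (s : Int) :
    (PySem.List.enumerate xs s).map (fun p => g p.2) = xs.map g := by
  induction xs generalizing s with
  | nil => simp [PySem.List.enumerate_nil]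
  | cons x xs ih => simp [PySem.List.enumerate_cons, ih]

theorem mid_map (tag : String) (hO : ¬ tag = "O") (n : Int) (h1 : ¬ n = 1)
    (mid : List String) (s : Int) (hs : 1 ≤ s) (hub : s + mid.length ≤ n - 1) :
    (PySem.List.enumerate mid s).map (fun p =>
        [p.2, if tag = "O" then "O" else if n = 1 then "U-" ++ tag
              else if p.1 = 0 then "B-" ++ tag else if p.1 = n - 1 then "L-" ++ tag
              else "I-" ++ tag])
      = mid.map (fun w => [w, "I-" ++ tag]) := by
  induction mid generalizing s with
  | nil => simp [PySem.List.enumerate_nil]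
  | cons x xs ih =>
    simp only [List.length_cons] at hub
    rw [PySem.List.enumerate_cons, List.map_cons, List.map_cons]
    congr 1
    · simp only [if_neg hO, if_neg h1,
        if_neg (show ¬ s = 0 by omega), if_neg (show ¬ s = n - 1 by push_cast at hub; omega)]
    · exact ih (s+1) (by omega) (by push_cast at hub ⊢; omega)

theorem key (tag phrase : String) : tag_items tag phrase = tag_items_alt tag phrase := by
  simp only [tag_items, tag_items_alt]
  rw [PySem.List.foldl_append_singleton_eq_map]
  generalize (PySem.Str.split₀ phrase).map PySem.Str.lower = ws
  by_cases hO : tag = "O"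
  · simp only [hO, List.nil_append]
    exact (map_enum_snd (fun x => [x, "O"]) ws 0).symm
  · match ws with
    | [] => simp [PySem.List.enumerate_nil, hO]
    | [a] =>
      simp [PySem.List.enumerate_cons, PySem.List.enumerate_nil, hO,
        PySem.List.pyGetD_zero_cons]
    | [a, b] =>
      simp [PySem.List.enumerate_cons, PySem.List.enumerate_nil, hO,
        PySem.List.pyGetD]
    | a :: x :: y :: rest =>
      obtain ⟨mid, b, hne, hmb⟩ : ∃ mid b, mid ≠ [] ∧ x :: y :: rest = mid ++ [b] :=
        ⟨(x :: y :: rest).dropLast, (x :: y :: rest).getLast (by simp),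
          by simp, (List.dropLast_append_getLast (by simp)).symm⟩
      rw [hmb]
      have hlen : (a :: (mid ++ [b])).length = mid.length + 2 := by simp
      rw [if_neg hO, if_neg (by simp), if_neg (by simp), if_neg (by
        simp only [hlen]
        have := List.length_pos_iff.2 hne
        omega)]
      have hslice : PySem.List.slice (a :: (mid ++ [b])) (some 1) (some (-1)) = mid := by
        simp [PySem.List.slice, PySem.List.clampIdx]
        rw [if_neg (by omega)]
        simp
      rw [hslice]
      rw [show a :: (mid ++ [b]) = (a :: mid) ++ [b] from rfl] at *
      rw [PySem.List.pyGetD_neg_one_append_singleton]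
      rw [show (a :: mid) ++ [b] = a :: (mid ++ [b]) from rfl]
      rw [PySem.List.pyGetD_zero_cons, PySem.List.enumerate_cons,
        PySem.List.enumerate_append, List.map_cons, List.map_append]
      have hn : ((a :: (mid ++ [b])).length : Int) = (mid.length : Int) + 2 := by
        simp; ring
      rw [hn]
      simp only [zero_add]
      rw [mid_map tag hO ((mid.length : Int) + 2) (by omega) mid 1 le_rfl (by omega)]
      have hlast : (PySem.List.enumerate [b] (1 + (mid.length : Int))).map (fun p =>
          [p.2, if tag = "O" then "O" else if (mid.length : Int) + 2 = 1 then "U-" ++ tag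
              else if p.1 = 0 then "B-" ++ tag
              else if p.1 = (mid.length : Int) + 2 - 1 then "L-" ++ tag
              else "I-" ++ tag]) = [[b, "L-" ++ tag]] := by
        rw [PySem.List.enumerate_cons, PySem.List.enumerate_nil]
        simp only [List.map_cons, List.map_nil]
        rw [if_neg hO, if_neg (by omega), if_neg (by omega), if_pos (by omega)]
      rw [hlast]
      simp [hO, show ¬((mid.length:Int) + 2 = 1) by omega]

-- ===== VERDICT (by name: the statement is the Claim_ definition above) =====
theorem tag_items_spec : Claim_equal_tag_items := by
  intro tag phrase _
  exact key tag phrase
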